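-- pv_equiv track=rewrite | github.com/career-prep/ucp-namer-latam-2026 | homework3/aditya_nagpal/q11_Vacation_Destinations.py | vacationDestinations
-- ===== SOURCE A (Python) =====
-- from collections import defaultdict
--
-- def vacationDestinations(city_edge_list, origin_city, k):
--     city_adj_list = defaultdict(list)
--     visited = set()
--     resDestinations = []
--     cost = 0
--     for city1, city2, hours in city_edge_list:
--         city_adj_list[city1].append((city2, hours))
--         city_adj_list[city2].append((city1, hours))
--
--     dfs(city_adj_list, origin_city, k, visited, resDestinations, cost)
--
--     # print (city_adj_list)
--     return resDestinations
--
-- def dfs(city_adj_list, origin_city, k, visited, resDestinations, cost):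
--     visited.add(origin_city)
--     for nei_city in city_adj_list[origin_city]:
--         if nei_city[0] not in visited:
--             new_cost = cost+ nei_city[1] #logic to add 1 for visted detiantion in recursive call
--             if new_cost <= k:
--                 resDestinations.append(nei_city[0])
--             dfs(city_adj_list, nei_city[0], k, visited, resDestinations, new_cost+1)
-- ===== SOURCE B (Python) =====
-- def vacationDestinations(city_edge_list, origin_city, k):
--     adj = {}
--     for c1, c2, h in city_edge_list:
--         adj.setdefault(c1, []).append((c2, h))
--         adj.setdefault(c2, []).append((c1, h))
--     visited = {origin_city}
--     res = []
--     stack = [(iter(adj.get(origin_city, ())), 0)]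
--     while stack:
--         it, cost = stack[-1]
--         nxt = next(it, None)
--         if nxt is None:
--             stack.pop()
--             continue
--         n, h = nxt
--         if n in visited:
--             continue
--         new_cost = cost + h
--         if new_cost <= k:
--             res.append(n)
--         visited.add(n)
--         stack.append((iter(adj.get(n, ())), new_cost + 1))
--     return res
-- ===== Notes on version B (the rewrite author's own statement) =====
-- stated objective: alternative
-- what changed: The recursive dfs helper is inlined and replaced by an iterative DFS over an explicit stack of (neighbour-iterator, accumulated-cost) frames, reproducing the same pre-order append sequence and visited discipline without recursion.
import Mathlib
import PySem

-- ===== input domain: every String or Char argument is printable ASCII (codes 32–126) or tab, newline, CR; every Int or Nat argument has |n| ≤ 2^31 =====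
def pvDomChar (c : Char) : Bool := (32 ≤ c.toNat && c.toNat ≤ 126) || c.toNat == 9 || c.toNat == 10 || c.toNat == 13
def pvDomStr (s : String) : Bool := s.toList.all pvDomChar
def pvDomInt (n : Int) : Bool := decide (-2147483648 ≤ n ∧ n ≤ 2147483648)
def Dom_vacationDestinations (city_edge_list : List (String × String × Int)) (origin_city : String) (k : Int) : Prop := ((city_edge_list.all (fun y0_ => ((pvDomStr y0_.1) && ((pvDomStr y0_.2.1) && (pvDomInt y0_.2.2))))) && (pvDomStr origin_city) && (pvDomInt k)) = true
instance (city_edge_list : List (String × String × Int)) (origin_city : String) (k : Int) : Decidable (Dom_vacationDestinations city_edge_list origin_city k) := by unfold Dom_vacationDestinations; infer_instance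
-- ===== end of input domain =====

-- B replaces A's recursive DFS helper by an inlined, explicit-stack iterative DFS (same order of
-- appends, same visited discipline); objective: alternative (same asymptotic cost, no recursion).

-- ===== PORT A =====
-- adjacency build shared by both Pythons: defaultdict(list) with append in both directions
def pvAdj (edges : List (String × String × Int)) : PySem.Dict String (List (String × Int)) :=
  edges.foldl
    (fun d e =>
      (d.modify e.1 [] (fun l => l ++ [(e.2.1, e.2.2)])).modify e.2.1 [] (fun l => l ++ [(e.1, e.2.2)]))
    PySem.Dict.empty

-- A's dfs helper, transliterated; the Nat fuel only makes the recursion total (the initial fuel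
-- 2·|edges|+1 bounds the number of nested dfs calls, each call after the root marks a fresh node)
def pvDfs (adj : PySem.Dict String (List (String × Int))) (k : Int) :
    Nat → String → Int → PySem.Set String × List String → PySem.Set String × List String
  | 0, _, _, s => s
  | f + 1, city, cost, s =>
      (adj.getD city []).foldl
        (fun s nh =>
          if PySem.Set.contains s.1 nh.1 then s
          else
            pvDfs adj k f nh.1 (cost + nh.2 + 1)
              (s.1, if cost + nh.2 ≤ k then s.2 ++ [nh.1] else s.2))
        (PySem.Set.add s.1 city, s.2)

def vacationDestinations (city_edge_list : List (String × String × Int)) (origin_city : String) (k : Int) : List String :=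
  (pvDfs (pvAdj city_edge_list) k (2 * city_edge_list.length + 1) origin_city 0 (PySem.Set.empty, [])).2

-- ===== PORT B =====
-- termination infrastructure for the stack loop (proof-of-totality only)
def pvMaxAdj (adj : PySem.Dict String (List (String × Int))) : Nat :=
  (adj.values.map List.length).foldr Nat.max 0

def pvMeasure (C : Nat) (stack : List (List (String × Int) × Int × Nat)) : Nat :=
  (stack.map (fun fr => (fr.1.length + 1) * C ^ fr.2.2)).sum

theorem pv_le_foldr_max (x : Nat) (l : List Nat) (h : x ∈ l) : x ≤ l.foldr Nat.max 0 := by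
  induction l with
  | nil => cases h
  | cons a t ih =>
    rcases List.mem_cons.mp h with rfl | h'
    · exact le_max_left _ _
    · exact le_trans (ih h') (le_max_right _ _)

theorem pvAdjLen_le (adj : PySem.Dict String (List (String × Int))) (n : String) :
    (adj.getD n []).length ≤ pvMaxAdj adj := by
  rw [PySem.Dict.getD_eq_get?_getD]
  cases hg : adj.get? n with
  | none => simp [pvMaxAdj]
  | some v =>
    have hv : v ∈ adj.values := by
      have := PySem.Dict.mem_items_of_get?_eq_some adj hg
      simp only [PySem.Dict.values]
      exact List.mem_map.mpr ⟨(n, v), this, rfl⟩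
    have : v.length ∈ adj.values.map List.length := List.mem_map.mpr ⟨v, hv, rfl⟩
    simpa using pv_le_foldr_max _ _ this

theorem pv_meas_lt₁ (X R tl : Nat) (hX : 1 ≤ X) : (tl + 1) * X + R < (tl + 2) * X + R := by
  have h : (tl + 2) * X = (tl + 1) * X + X := by ring
  rw [h]; omega

theorem pv_meas_lt₂ (x X R tl : Nat) (hx : x < X) : x + ((tl + 1) * X + R) < (tl + 2) * X + R := by
  have h : (tl + 2) * X = (tl + 1) * X + X := by ring
  rw [h]; omega

-- B's while loop over an explicit stack; each frame = (remaining neighbours, accumulated cost,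
-- fuel guard).  The fuel component only makes the loop total, exactly as pvDfs's fuel does.
def pvRun (adj : PySem.Dict String (List (String × Int))) (k : Int) :
    List (List (String × Int) × Int × Nat) → PySem.Set String × List String → PySem.Set String × List String
  | [], s => s
  | ([], _c, _g) :: rest, s => pvRun adj k rest s
  | ((n, h) :: t, cost, g) :: rest, s =>
      if PySem.Set.contains s.1 n then
        pvRun adj k ((t, cost, g) :: rest) s
      else
        if g = 0 then
          pvRun adj k ((t, cost, g) :: rest)
            (s.1, if cost + h ≤ k then s.2 ++ [n] else s.2)
        else
          pvRun adj k ((adj.getD n [], cost + h + 1, g - 1) :: (t, cost, g) :: rest)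
            (PySem.Set.add s.1 n, if cost + h ≤ k then s.2 ++ [n] else s.2)
  termination_by stack _ => pvMeasure (pvMaxAdj adj + 2) stack
  decreasing_by
  · simp only [pvMeasure, List.map_cons, List.sum_cons, List.length_nil]
    have h1 : 1 ≤ (pvMaxAdj adj + 2) ^ _g := Nat.one_le_pow _ _ (by omega)
    linarith
  · simp only [pvMeasure, List.map_cons, List.sum_cons, List.length_cons]
    exact pv_meas_lt₁ _ _ _ (Nat.one_le_pow _ _ (by omega))
  · simp only [pvMeasure, List.map_cons, List.sum_cons, List.length_cons]
    exact pv_meas_lt₁ _ _ _ (Nat.one_le_pow _ _ (by omega))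
  · simp only [pvMeasure, List.map_cons, List.sum_cons, List.length_cons]
    rw [Nat.add_assoc]
    apply pv_meas_lt₂
    have h1 : (adj.getD n []).length + 1 < pvMaxAdj adj + 2 := by
      have := pvAdjLen_le adj n; omega
    have hg : g - 1 + 1 = g := by omega
    calc ((adj.getD n []).length + 1) * (pvMaxAdj adj + 2) ^ (g - 1)
        < (pvMaxAdj adj + 2) * (pvMaxAdj adj + 2) ^ (g - 1) :=
          Nat.mul_lt_mul_of_lt_of_le h1 (le_refl _) (pow_pos (by omega) _)
      _ = (pvMaxAdj adj + 2) ^ (g - 1 + 1) := by rw [pow_succ]; ring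
      _ = (pvMaxAdj adj + 2) ^ g := by rw [hg]

def vacationDestinations_alt (city_edge_list : List (String × String × Int)) (origin_city : String) (k : Int) : List String :=
  (pvRun (pvAdj city_edge_list) k
      [((pvAdj city_edge_list).getD origin_city [], 0, 2 * city_edge_list.length)]
      (PySem.Set.ofList [origin_city], [])).2

-- ===== PRECONDITION & SPEC =====
def Spec_vacationDestinations (city_edge_list : List (String × String × Int)) (origin_city : String) (k : Int) (out : List String) : Prop := out = vacationDestinations_alt city_edge_list origin_city k
instance (city_edge_list : List (String × String × Int)) (origin_city : String) (k : Int) (out : List String) : Decidable (Spec_vacationDestinations city_edge_list origin_city k out) := by unfold Spec_vacationDestinations; infer_instance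

-- ===== CLAIM (what is proved, stated in full; the proofs are below) =====
def Claim_equal_vacationDestinations : Prop := ∀ (city_edge_list : List (String × String × Int)) (origin_city : String) (k : Int), Dom_vacationDestinations city_edge_list origin_city k → Spec_vacationDestinations city_edge_list origin_city k (vacationDestinations city_edge_list origin_city k)

-- ===== LEMMAS AND PROOFS =====

-- A's inner loop body at fuel g (the fold step of pvDfs at fuel g+1)
def pvStep (adj : PySem.Dict String (List (String × Int))) (k : Int) (g : Nat) (cost : Int)
    (s : PySem.Set String × List String) (nh : String × Int) : PySem.Set String × List String :=
  if PySem.Set.contains s.1 nh.1 then s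
  else
    pvDfs adj k g nh.1 (cost + nh.2 + 1)
      (s.1, if cost + nh.2 ≤ k then s.2 ++ [nh.1] else s.2)

theorem pvDfs_succ (adj : PySem.Dict String (List (String × Int))) (k : Int) (f : Nat)
    (city : String) (cost : Int) (s : PySem.Set String × List String) :
    pvDfs adj k (f + 1) city cost s
      = (adj.getD city []).foldl (pvStep adj k f cost) (PySem.Set.add s.1 city, s.2) := by
  rw [pvDfs]; rfl

-- the key simulation lemma: running the machine on the top frame until it pops equals folding
-- A's loop body over the frame's remaining neighbours, and then continuing with the rest
theorem pvRun_frame (adj : PySem.Dict String (List (String × Int))) (k : Int) :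
    ∀ (g : Nat) (rem : List (String × Int)) (cost : Int)
      (rest : List (List (String × Int) × Int × Nat)) (s : PySem.Set String × List String),
      pvRun adj k ((rem, cost, g) :: rest) s
        = pvRun adj k rest (rem.foldl (pvStep adj k g cost) s) := by
  intro g
  induction g using Nat.strong_induction_on with
  | _ g ihg =>
    intro rem
    induction rem with
    | nil => intro cost rest s; rw [pvRun]; rfl
    | cons nh t iht =>
      intro cost rest s
      obtain ⟨n, h⟩ := nh
      rw [pvRun]
      by_cases hc : PySem.Set.contains s.1 n
      · simp only [hc, if_true]
        rw [iht]
        simp only [List.foldl_cons, pvStep, hc, if_true]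
      · simp only [hc, if_false, Bool.false_eq_true]
        cases g with
        | zero =>
          simp only [if_true]
          rw [iht]
          simp only [List.foldl_cons, pvStep, hc, if_false, Bool.false_eq_true, pvDfs]
        | succ g' =>
          simp only [Nat.succ_ne_zero, if_false, Nat.add_sub_cancel]
          rw [ihg g' (Nat.lt_succ_self g'), iht]
          simp only [List.foldl_cons, pvStep, hc, if_false, Bool.false_eq_true,
            pvDfs_succ]

-- ===== VERDICT (by name: the statement is the Claim_ definition above) =====
theorem vacationDestinations_spec : Claim_equal_vacationDestinations := by
  intro edges origin k _
  unfold Spec_vacationDestinations vacationDestinations vacationDestinations_alt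
  rw [pvRun_frame, pvDfs_succ, pvRun]
  rfl
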